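-- pv_equiv track=rewrite | github.com/ian-sequ7/fintel | adapters/capitol_trades_scraper.py | _parse_party_info
-- ===== SOURCE A (Python) =====
-- def _parse_party_info(party_info: str) -> tuple[str, str, str]:
--     """Parse party info string like 'Republican|House|IN' or 'Democrat|House|NJ'."""
--     parts = party_info.replace('|', ' ').split()
--
--     party = "I"
--     chamber = "House"
--     state = ""
--
--     for part in parts:
--         part_lower = part.lower()
--         if "republican" in part_lower:
--             party = "R"
--         elif "democrat" in part_lower:
--             party = "D"
--         elif "independent" in part_lower:
--             party = "I"
--         elif part_lower in ("house", "senate"):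
--             chamber = part.capitalize()
--         elif len(part) == 2 and part.isupper():
--             state = part
--
--     return party, chamber, state
-- ===== SOURCE B (Python) =====
-- def _parse_party_info(party_info: str) -> tuple[str, str, str]:
--     """Parse party info string like 'Republican|House|IN' (three independent last-wins scans)."""
--     parts = party_info.replace('|', ' ').split()
--
--     party = next(("R" if "republican" in pl else "D" if "democrat" in pl else "I"
--                   for pl in (p.lower() for p in reversed(parts))
--                   if "republican" in pl or "democrat" in pl or "independent" in pl), "I")
--     chamber = next((p.capitalize() for p in reversed(parts)
--                     if p.lower() in ("house", "senate")), "House")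
--     state = next((p for p in reversed(parts) if len(p) == 2 and p.isupper()), "")
--
--     return party, chamber, state
-- ===== Notes on version B (the rewrite author's own statement) =====
-- stated objective: alternative
-- what changed: Replaces A's single loop that threads a (party, chamber, state) accumulator through an elif chain with three independent per-field lookups, each a reversed-scan next(..., default) that picks the last matching token (substring match for party, exact case-insensitive match for chamber, len==2-and-uppercase for state).
import Mathlib
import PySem

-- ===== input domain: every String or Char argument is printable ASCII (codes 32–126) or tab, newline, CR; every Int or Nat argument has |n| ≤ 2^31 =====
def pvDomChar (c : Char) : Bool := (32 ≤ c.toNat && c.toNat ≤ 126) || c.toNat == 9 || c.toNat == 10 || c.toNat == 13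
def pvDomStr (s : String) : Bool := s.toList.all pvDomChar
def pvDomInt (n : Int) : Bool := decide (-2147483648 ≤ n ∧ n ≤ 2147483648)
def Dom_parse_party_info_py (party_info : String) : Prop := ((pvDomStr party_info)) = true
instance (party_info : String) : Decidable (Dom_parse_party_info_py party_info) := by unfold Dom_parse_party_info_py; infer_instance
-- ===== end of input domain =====

-- B replaces A's single combined elif-chain loop by three independent reversed-scan
-- lookups (one per field), same values; objective: alternative decomposition.

-- hand port of Python str.capitalize() (exact on ASCII: first char uppercased, rest lowercased)
def pyCapitalize (s : String) : String :=
  match s.toList with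
  | [] => ""
  | c :: t => String.ofList (PySem.Chars.upperChar c :: PySem.Chars.lower t)

-- hand port of Python str.isupper() (exact on ASCII, where the cased chars are exactly the
-- letters: at least one letter and no lowercase letter)
def pyStrIsupper (s : String) : Bool :=
  s.toList.any (fun c => PySem.Chars.isalpha c) && s.toList.all (fun c => !(PySem.Chars.islower c))

-- ===== PORT A =====
-- A's loop body: the elif chain updating the accumulated (party, chamber, state)
def pvStepA (acc : String × String × String) (part : String) : String × String × String :=
  if PySem.Str.isIn "republican" (PySem.Str.lower part) then ("R", acc.2.1, acc.2.2)
  else if PySem.Str.isIn "democrat" (PySem.Str.lower part) then ("D", acc.2.1, acc.2.2)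
  else if PySem.Str.isIn "independent" (PySem.Str.lower part) then ("I", acc.2.1, acc.2.2)
  else if PySem.Str.lower part == "house" || PySem.Str.lower part == "senate" then
    (acc.1, pyCapitalize part, acc.2.2)
  else if PySem.Str.len part == (2 : Int) && pyStrIsupper part then (acc.1, acc.2.1, part)
  else acc

def parse_party_info_py (party_info : String) : String × String × String :=
  let parts := PySem.Str.split₀ (PySem.Str.replace party_info "|" " ")
  parts.foldl pvStepA ("I", "House", "")

-- ===== PORT B =====
-- three independent last-wins scans: each 'next(…, default)' is find? on the reversed
-- token list, mapped, with a default
def parse_party_info_py_alt (party_info : String) : String × String × String :=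
  let parts := PySem.Str.split₀ (PySem.Str.replace party_info "|" " ")
  let party :=
    (((parts.reverse.map (fun p => PySem.Str.lower p)).find?
        (fun pl => PySem.Str.isIn "republican" pl || PySem.Str.isIn "democrat" pl
          || PySem.Str.isIn "independent" pl)).map
      (fun pl => if PySem.Str.isIn "republican" pl then "R"
                 else if PySem.Str.isIn "democrat" pl then "D" else "I")).getD "I"
  let chamber :=
    ((parts.reverse.find?
        (fun p => PySem.Str.lower p == "house" || PySem.Str.lower p == "senate")).map
      (fun p => pyCapitalize p)).getD "House"
  let state :=
    (parts.reverse.find? (fun p => PySem.Str.len p == (2 : Int) && pyStrIsupper p)).getD ""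
  (party, chamber, state)

-- ===== PRECONDITION & SPEC =====
def Spec_parse_party_info_py (party_info : String) (out : String × String × String) : Prop := out = parse_party_info_py_alt party_info
instance (party_info : String) (out : String × String × String) : Decidable (Spec_parse_party_info_py party_info out) := by unfold Spec_parse_party_info_py; infer_instance

-- ===== CLAIM (what is proved, stated in full; the proofs are below) =====
def Claim_equal_parse_party_info_py : Prop := ∀ (party_info : String), Dom_parse_party_info_py party_info → Spec_parse_party_info_py party_info (parse_party_info_py party_info)

-- ===== LEMMAS AND PROOFS =====

-- the three per-field predicates (on the raw token) and the party mapping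
def pvPp (p : String) : Bool :=
  PySem.Str.isIn "republican" (PySem.Str.lower p) || PySem.Str.isIn "democrat" (PySem.Str.lower p)
    || PySem.Str.isIn "independent" (PySem.Str.lower p)
def pvPc (p : String) : Bool :=
  PySem.Str.lower p == "house" || PySem.Str.lower p == "senate"
def pvPs (p : String) : Bool := PySem.Str.len p == (2 : Int) && pyStrIsupper p
def pvFp (p : String) : String :=
  if PySem.Str.isIn "republican" (PySem.Str.lower p) then "R"
  else if PySem.Str.isIn "democrat" (PySem.Str.lower p) then "D" else "I"

lemma pvLen_lower (p : String) : (PySem.Str.lower p).toList.length = p.toList.length := by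
  rw [PySem.Str.toList_lower, PySem.Chars.lower, List.length_map]

lemma pvPc_not_Pp (p : String) (h : pvPc p = true) : pvPp p = false := by
  unfold pvPc at h
  rcases Bool.or_eq_true_iff.mp h with h' | h' <;>
    · have he := eq_of_beq h'
      unfold pvPp
      simp only [PySem.Str.isIn_eq, he]
      decide

lemma pvPs_len (p : String) (h : pvPs p = true) : p.toList.length = 2 := by
  unfold pvPs at h
  have h2 := (Bool.and_eq_true_iff.mp h).1
  rw [PySem.Str.len_eq] at h2
  have := eq_of_beq h2
  omega

lemma pvPs_not_Pp (p : String) (h : pvPs p = true) : pvPp p = false := by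
  have hlen := pvPs_len p h
  unfold pvPp
  simp only [Bool.or_eq_false_iff, PySem.Str.isIn_eq]
  refine ⟨⟨?_, ?_⟩, ?_⟩ <;>
    · rw [PySem.Chars.isIn_eq_false_iff]
      intro hinf
      have := hinf.length_le
      rw [PySem.Str.toList_lower, PySem.Chars.lower, List.length_map, hlen] at this
      simp at this

lemma pvPs_not_Pc (p : String) (h : pvPs p = true) : pvPc p = false := by
  have hlen := pvPs_len p h
  unfold pvPc
  simp only [Bool.or_eq_false_iff, beq_eq_false_iff_ne, ne_eq]
  constructor <;>
    · intro he
      have := congrArg (fun s => s.toList.length) he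
      simp only [pvLen_lower, hlen] at this
      simp at this

-- A's elif-chain step, written field-by-field (uses that the three predicates are disjoint)
lemma pvStepA_eq (acc : String × String × String) (p : String) :
    pvStepA acc p = (if pvPp p then pvFp p else acc.1,
                     if pvPc p then pyCapitalize p else acc.2.1,
                     if pvPs p then p else acc.2.2) := by
  have hcp := pvPc_not_Pp p
  have hsp := pvPs_not_Pp p
  have hsc := pvPs_not_Pc p
  unfold pvStepA
  cases h1 : PySem.Str.isIn "republican" (PySem.Str.lower p) with
  | true =>
    have hp : pvPp p = true := by unfold pvPp; rw [h1]; rfl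
    have hc : pvPc p = false := by
      cases h : pvPc p with
      | false => rfl
      | true => exact absurd hp (by simp [hcp h])
    have hs : pvPs p = false := by
      cases h : pvPs p with
      | false => rfl
      | true => exact absurd hp (by simp [hsp h])
    have hf : pvFp p = "R" := by unfold pvFp; rw [h1]; rfl
    simp [hf, hp, hc, hs]
  | false =>
    cases h2 : PySem.Str.isIn "democrat" (PySem.Str.lower p) with
    | true =>
      have hp : pvPp p = true := by unfold pvPp; rw [h1, h2]; rfl
      have hc : pvPc p = false := by
        cases h : pvPc p with
        | false => rfl
        | true => exact absurd hp (by simp [hcp h])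
      have hs : pvPs p = false := by
        cases h : pvPs p with
        | false => rfl
        | true => exact absurd hp (by simp [hsp h])
      have hf : pvFp p = "D" := by unfold pvFp; rw [h1, h2]; rfl
      simp [hf, hp, hc, hs]
    | false =>
      cases h3 : PySem.Str.isIn "independent" (PySem.Str.lower p) with
      | true =>
        have hp : pvPp p = true := by unfold pvPp; rw [h1, h2, h3]; rfl
        have hc : pvPc p = false := by
          cases h : pvPc p with
          | false => rfl
          | true => exact absurd hp (by simp [hcp h])
        have hs : pvPs p = false := by
          cases h : pvPs p with
          | false => rfl
          | true => exact absurd hp (by simp [hsp h])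
        have hf : pvFp p = "I" := by unfold pvFp; rw [h1, h2]; rfl
        simp [hf, hp, hc, hs]
      | false =>
        have hp : pvPp p = false := by unfold pvPp; rw [h1, h2, h3]; rfl
        cases h4 : pvPc p with
        | true =>
          have hs : pvPs p = false := by
            cases h : pvPs p with
            | false => rfl
            | true => exact absurd h4 (by simp [hsc h])
          have h4' := h4; unfold pvPc at h4'
          simp [h4', hp, hs]
        | false =>
          have h4' := h4; unfold pvPc at h4'
          cases h5 : pvPs p with
          | true =>
            have h5' := h5; unfold pvPs at h5'
            simp at h4' h5'
            simp [h4', h5', hp]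
          | false =>
            have h5' := h5; unfold pvPs at h5'
            simp at h4' h5'
            simp [h4', hp]
            intro hl hu
            simp [h5' hl] at hu

-- one token appended on the right of a find? = "last wins" over the default
lemma pvOr_map_getD (x : Option String) (P : String → Bool) (f : String → String) (p a : String) :
    ((x.or ([p].find? P)).map f).getD a = (x.map f).getD (if P p then f p else a) := by
  cases x with
  | some q => rfl
  | none => cases h : P p <;> simp [List.find?, h]

lemma pvOr_getD (x : Option String) (P : String → Bool) (p a : String) :
    (x.or ([p].find? P)).getD a = x.getD (if P p then p else a) := by
  cases x with
  | some q => rfl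
  | none => cases h : P p <;> simp [List.find?, h]

-- the combined fold computes, per field, the last matching token (default = the accumulator)
lemma pvFoldl_eq (l : List String) (a b c : String) :
    l.foldl pvStepA (a, b, c) =
      (((l.reverse.find? pvPp).map pvFp).getD a,
       ((l.reverse.find? pvPc).map (fun p => pyCapitalize p)).getD b,
       (l.reverse.find? pvPs).getD c) := by
  induction l generalizing a b c with
  | nil => rfl
  | cons p t ih =>
    rw [List.foldl_cons, pvStepA_eq, ih, List.reverse_cons]
    simp only [List.find?_append]
    rw [pvOr_map_getD, pvOr_map_getD, pvOr_getD]

-- B's party scan over the lowered tokens = the pvPp/pvFp scan over the raw tokens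
lemma pvParty_map (l : List String) :
    (((l.map (fun p => PySem.Str.lower p)).find?
        (fun pl => PySem.Str.isIn "republican" pl || PySem.Str.isIn "democrat" pl
          || PySem.Str.isIn "independent" pl)).map
      (fun pl => if PySem.Str.isIn "republican" pl then "R"
                 else if PySem.Str.isIn "democrat" pl then "D" else "I")).getD "I"
      = ((l.find? pvPp).map pvFp).getD "I" := by
  rw [List.find?_map]
  have hq : ((fun pl => PySem.Str.isIn "republican" pl || PySem.Str.isIn "democrat" pl
      || PySem.Str.isIn "independent" pl) ∘ (fun p => PySem.Str.lower p)) = pvPp := rfl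
  rw [hq]
  cases l.find? pvPp with
  | some q => rfl
  | none => rfl

-- ===== VERDICT (by name: the statement is the Claim_ definition above) =====
theorem parse_party_info_py_spec : Claim_equal_parse_party_info_py := by
  intro s _
  show parse_party_info_py s = parse_party_info_py_alt s
  simp only [parse_party_info_py, parse_party_info_py_alt]
  rw [pvFoldl_eq, ← pvParty_map]
  rfl
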